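-- pv_equiv track=rewrite | github.com/wyk18703232953/myResearch | codeComplex/data/filteredData/python/quadratic/python_quadratic_0432.py | is_golden
-- ===== SOURCE A (Python) =====
-- def is_golden(total, integers):
--     current_total = 0
--     for i, val in enumerate(integers):
--         current_total += val
--         if current_total < total:
--             continue
--         elif current_total == total:
--             splice = integers[i + 1:]
--             return (not splice) or is_golden(total, splice)
--         else:  # current_total > total
--             return False
--     return False
-- ===== SOURCE B (Python) =====
-- def is_golden(total, integers):
--     acc = 0
--     hit = False
--     for v in integers:
--         acc += v
--         if acc == total:
--             acc = 0
--             hit = True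
--         elif acc > total:
--             return False
--         else:
--             hit = False
--     return hit
-- ===== Notes on version B (the rewrite author's own statement) =====
-- stated objective: simpler
-- what changed: Replaced the recursive call on a fresh list slice after each completed block by a single linear pass that resets a running-sum accumulator on equality and tracks whether the last element closed a block, eliminating all slicing and recursion.
import Mathlib
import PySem

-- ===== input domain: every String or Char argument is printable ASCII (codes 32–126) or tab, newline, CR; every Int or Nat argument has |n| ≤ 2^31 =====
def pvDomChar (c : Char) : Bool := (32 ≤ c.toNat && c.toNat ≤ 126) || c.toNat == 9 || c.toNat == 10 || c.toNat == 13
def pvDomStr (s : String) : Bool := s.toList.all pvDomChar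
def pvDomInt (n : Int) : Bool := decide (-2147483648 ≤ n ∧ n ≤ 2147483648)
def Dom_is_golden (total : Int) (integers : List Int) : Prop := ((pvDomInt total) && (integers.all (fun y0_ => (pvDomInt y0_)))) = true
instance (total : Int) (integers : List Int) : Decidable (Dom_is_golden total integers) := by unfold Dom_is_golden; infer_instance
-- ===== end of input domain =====

-- B replaces A's recursion on a list slice after each completed block with one linear
-- pass that resets a running-sum accumulator on equality (objective: simpler, no slicing/recursion).


-- ===== PORT A =====
-- A's for-loop over enumerate(integers) with current_total, as structural recursion over the
-- remaining list; `integers[i+1:]` is exactly the list remaining after position i, so the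
-- recursive call `is_golden(total, splice)` is the loop restarted on `rest` with current_total 0.
def isGoldenAux (total : Int) : List Int → Int → Bool
  | [], _ => false
  | val :: rest, currentTotal =>
    let ct := currentTotal + val
    if ct < total then isGoldenAux total rest ct
    else if ct = total then rest.isEmpty || isGoldenAux total rest 0
    else false

def is_golden (total : Int) (integers : List Int) : Bool := isGoldenAux total integers 0

-- ===== PORT B =====
-- one pass: Option state models the early `return False`; the pair is (acc, hit).
def goldenStep (total : Int) (st : Option (Int × Bool)) (v : Int) : Option (Int × Bool) :=
  match st with
  | none => none
  | some (acc, _) =>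
    let acc := acc + v
    if acc = total then some (0, true)
    else if acc > total then none
    else some (acc, false)

def is_golden_alt (total : Int) (integers : List Int) : Bool :=
  match integers.foldl (goldenStep total) (some (0, false)) with
  | none => false
  | some (_, hit) => hit

-- ===== PRECONDITION & SPEC =====
def Spec_is_golden (total : Int) (integers : List Int) (out : Bool) : Prop := out = is_golden_alt total integers
instance (total : Int) (integers : List Int) (out : Bool) : Decidable (Spec_is_golden total integers out) := by unfold Spec_is_golden; infer_instance

-- ===== CLAIM (what is proved, stated in full; the proofs are below) =====
def Claim_equal_is_golden : Prop := ∀ (total : Int) (integers : List Int), Dom_is_golden total integers → Spec_is_golden total integers (is_golden total integers)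

-- ===== LEMMAS AND PROOFS =====

theorem goldenStep_none (total : Int) (l : List Int) :
    l.foldl (goldenStep total) none = none := by
  induction l with
  | nil => rfl
  | cons x r ih => simpa [goldenStep] using ih

-- the hit flag of the state is never read by the step function
theorem goldenStep_hit_irrel (total acc : Int) (h₁ h₂ : Bool) (v : Int) :
    goldenStep total (some (acc, h₁)) v = goldenStep total (some (acc, h₂)) v := by
  simp [goldenStep]

def goldenFinish (st : Option (Int × Bool)) : Bool :=
  match st with
  | none => false
  | some (_, hit) => hit

theorem aux_eq_fold (total : Int) (l : List Int) : ∀ acc : Int,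
    isGoldenAux total l acc = goldenFinish (l.foldl (goldenStep total) (some (acc, false))) := by
  induction l with
  | nil => intro acc; rfl
  | cons v rest ih =>
    intro acc
    by_cases hlt : acc + v < total
    · have hne : ¬ acc + v = total := by omega
      have hgt : ¬ acc + v > total := by omega
      simp [isGoldenAux, goldenStep, hlt, hne, hgt, ih]
    · by_cases heq : acc + v = total
      · cases rest with
        | nil => simp [isGoldenAux, goldenStep, heq, goldenFinish]
        | cons x r =>
          have hstep : goldenStep total (some ((0 : Int), true)) x
              = goldenStep total (some ((0 : Int), false)) x :=
            goldenStep_hit_irrel total 0 true false x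
          have e1 : goldenStep total (some (acc, false)) v = some ((0 : Int), true) := by
            simp [goldenStep, heq]
          have h1 : isGoldenAux total (v :: x :: r) acc = isGoldenAux total (x :: r) 0 := by
            simp [isGoldenAux, heq]
          rw [h1, ih 0]
          simp only [List.foldl_cons, e1, hstep]
      · have hgt : acc + v > total := by omega
        simp [isGoldenAux, goldenStep, hlt, heq, hgt, goldenFinish, goldenStep_none]

-- ===== VERDICT (by name: the statement is the Claim_ definition above) =====
theorem is_golden_spec : Claim_equal_is_golden := by
  intro total integers _
  unfold Spec_is_golden is_golden is_golden_alt
  rw [aux_eq_fold]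
  rfl
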